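-- pv_equiv track=rewrite | github.com/juvelop17/problem_solving | Codeforces/#680_DIV2/A.py | solution
-- ===== SOURCE A (Python) =====
-- def solution(n, x, a, b):
--     answer = ''
--
--     b.sort(reverse=True)
--     pick = [False for _ in range(len(b))]
--
--     for i in range(len(a)):
--         is_pop = False
--         for j in range(len(b)):
--             if a[i] + b[j] <= x and pick[j] == False:
--                 pick[j] = True
--                 is_pop = True
--                 break
--         if is_pop == False:
--             return 'No'
--
--     return 'Yes'
-- ===== SOURCE B (Python) =====
-- def solution(n, x, a, b):
--     # Return value only: unlike A, this does not sort b in place.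
--     aa = sorted(a, reverse=True)
--     bb = sorted(b)
--     if len(aa) > len(bb):
--         return 'No'
--     return 'Yes' if all(s + t <= x for s, t in zip(aa, bb)) else 'No'
-- ===== Notes on version B (the rewrite author's own statement) =====
-- stated objective: faster
-- what changed: A runs a greedy O(n*m) scan with a pick-flag array (for each a, linear search for the first unpicked b with sum <= x); B replaces it by the classic matching criterion: sort a descending and b ascending and check the positional pairwise sums once.
import Mathlib
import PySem

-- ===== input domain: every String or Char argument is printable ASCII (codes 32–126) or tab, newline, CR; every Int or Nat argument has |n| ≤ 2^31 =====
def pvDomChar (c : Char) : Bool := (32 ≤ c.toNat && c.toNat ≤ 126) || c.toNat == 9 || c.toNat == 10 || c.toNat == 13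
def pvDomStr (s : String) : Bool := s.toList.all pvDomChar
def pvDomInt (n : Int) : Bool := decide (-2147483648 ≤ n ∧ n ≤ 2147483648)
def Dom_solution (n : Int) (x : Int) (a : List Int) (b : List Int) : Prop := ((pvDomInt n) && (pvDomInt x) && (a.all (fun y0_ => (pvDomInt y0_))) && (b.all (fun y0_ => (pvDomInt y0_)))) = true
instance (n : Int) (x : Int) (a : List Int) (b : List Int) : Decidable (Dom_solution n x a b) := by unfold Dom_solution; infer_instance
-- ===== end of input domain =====

-- B replaces A's O(n*m) greedy pick-flag scan by the sort-and-pair-pairwise matching criterion (measured faster, asymptotic).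
-- A sorts its argument b in place; B does not — the equivalence proved here is about the return value only.


-- ===== PORT A =====
-- inner loop `for j in range(len(b)): if a[i]+b[j] <= x and pick[j] == False: pick[j] = True; break`
-- rendered as a simultaneous scan of b and pick; `some pick'` = a j was flipped, `none` = loop fell through.
def pvScanPick (x v : Int) : List Int → List Bool → Option (List Bool)
  | [], _ => none
  | _ :: _, [] => none
  | c :: cs, p :: ps =>
    if v + c ≤ x ∧ p = false then some (true :: ps)
    else (pvScanPick x v cs ps).map (p :: ·)

-- outer loop `for i in range(len(a)): ... if is_pop == False: return 'No'`
def pvLoopA (x : Int) : List Int → List Int → List Bool → String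
  | [], _, _ => "Yes"
  | v :: vs, bb, pick =>
    match pvScanPick x v bb pick with
    | some pick' => pvLoopA x vs bb pick'
    | none => "No"

def solution (n : Int) (x : Int) (a : List Int) (b : List Int) : String :=
  let bb := PySem.List.sorted b (fun y => y) true
  let pick := List.replicate bb.length false
  pvLoopA x a bb pick

-- ===== PORT B =====
def solution_alt (n : Int) (x : Int) (a : List Int) (b : List Int) : String :=
  let aa := PySem.List.sorted a (fun y => y) true
  let bb := PySem.List.sorted b (fun y => y) false
  if aa.length > bb.length then "No"
  else if (aa.zip bb).all (fun p => p.1 + p.2 ≤ x) then "Yes" else "No"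

-- ===== PRECONDITION & SPEC =====
def Spec_solution (n : Int) (x : Int) (a : List Int) (b : List Int) (out : String) : Prop := out = solution_alt n x a b
instance (n : Int) (x : Int) (a : List Int) (b : List Int) (out : String) : Decidable (Spec_solution n x a b out) := by unfold Spec_solution; infer_instance

-- ===== CLAIM (what is proved, stated in full; the proofs are below) =====
def Claim_equal_solution : Prop := ∀ (n : Int) (x : Int) (a : List Int) (b : List Int), Dom_solution n x a b → Spec_solution n x a b (solution n x a b)

-- ===== LEMMAS AND PROOFS =====

-- the b-values still unpicked (in order)
def pvMask : List Int → List Bool → List Int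
  | [], _ => []
  | _ :: _, [] => []
  | c :: cs, p :: ps => if p then pvMask cs ps else c :: pvMask cs ps

-- remove the first element c of the list with v + c ≤ x
def pvRemFirst (x v : Int) : List Int → Option (List Int)
  | [] => none
  | c :: cs => if v + c ≤ x then some cs else (pvRemFirst x v cs).map (c :: ·)

-- A's algorithm on the masked list: repeatedly remove the first feasible partner
def pvGreedy (x : Int) : List Int → List Int → Bool
  | [], _ => true
  | v :: vs, bb =>
    match pvRemFirst x v bb with
    | some bb' => pvGreedy x vs bb'
    | none => false

theorem pvScan_mask (x v : Int) : ∀ (bb : List Int) (pick : List Bool),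
    pvRemFirst x v (pvMask bb pick) = (pvScanPick x v bb pick).map (fun pk => pvMask bb pk) := by
  intro bb
  induction bb with
  | nil => intro pick; simp [pvMask, pvScanPick, pvRemFirst]
  | cons c cs ih =>
    intro pick
    cases pick with
    | nil => simp [pvMask, pvScanPick, pvRemFirst]
    | cons p ps =>
      cases p with
      | true =>
        simp only [pvMask, pvScanPick, if_true, Bool.true_eq_false, and_false, if_false]
        rw [ih ps]
        cases h : pvScanPick x v cs ps <;> simp [pvMask]
      | false =>
        by_cases hf : v + c ≤ x
        · simp [pvMask, pvScanPick, pvRemFirst, hf]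
        · simp only [pvMask, pvScanPick, pvRemFirst, Bool.false_eq_true, if_false]
          rw [if_neg hf, if_neg (by simp [hf])]
          rw [ih ps]
          cases h : pvScanPick x v cs ps <;> simp [pvMask]

theorem pvLoop_greedy (x : Int) : ∀ (as bb : List Int) (pick : List Bool),
    pvLoopA x as bb pick = (if pvGreedy x as (pvMask bb pick) then "Yes" else "No") := by
  intro as
  induction as with
  | nil => intro bb pick; simp [pvLoopA, pvGreedy]
  | cons v vs ih =>
    intro bb pick
    have h := pvScan_mask x v bb pick
    cases hs : pvScanPick x v bb pick with
    | none => rw [hs] at h; simp [pvLoopA, hs, pvGreedy, h]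
    | some pk' =>
      rw [hs] at h
      simp only [Option.map_some] at h
      simp [pvLoopA, hs, pvGreedy, h, ih]

theorem pvMask_replicate : ∀ (bb : List Int), pvMask bb (List.replicate bb.length false) = bb := by
  intro bb
  induction bb with
  | nil => rfl
  | cons c cs ih => simp [pvMask, List.replicate, ih]

theorem pvRem_none (x v : Int) : ∀ (bb : List Int),
    pvRemFirst x v bb = none ↔ ∀ c ∈ bb, ¬ (v + c ≤ x) := by
  intro bb
  induction bb with
  | nil => simp [pvRemFirst]
  | cons c cs ih =>
    by_cases hf : v + c ≤ x
    · simp [pvRemFirst, hf]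
    · simp [pvRemFirst, hf, ih]
      intro _
      omega

theorem pvRem_some (x v : Int) : ∀ (bb bb' : List Int), bb.Pairwise (· ≥ ·) →
    pvRemFirst x v bb = some bb' →
    ∃ w, w ∈ bb ∧ v + w ≤ x ∧ (∀ c ∈ bb, v + c ≤ x → c ≤ w) ∧ bb' = bb.erase w := by
  intro bb
  induction bb with
  | nil => intro bb' _ h; simp [pvRemFirst] at h
  | cons c cs ih =>
    intro bb' hs h
    by_cases hf : v + c ≤ x
    · simp [pvRemFirst, hf] at h
      refine ⟨c, by simp, hf, ?_, by simp [← h]⟩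
      intro d hd _
      rcases List.mem_cons.mp hd with h1 | h1
      · omega
      · exact List.rel_of_pairwise_cons hs h1
    · simp only [pvRemFirst, if_neg hf, Option.map_eq_some_iff] at h
      obtain ⟨cs', hcs', rfl⟩ := h
      obtain ⟨w, hw, hfw, hmax, hrw⟩ := ih cs' (List.Pairwise.sublist (List.sublist_cons_self c cs) hs) hcs'
      have hcw : c ≠ w := fun hcw => hf (hcw ▸ hfw)
      refine ⟨w, by simp [hw], hfw, ?_, ?_⟩
      · intro d hd hfd
        rcases List.mem_cons.mp hd with h1 | h1
        · exact absurd (h1 ▸ hfd) hf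
        · exact hmax d h1 hfd
      · simp [hcw, hrw]

theorem pvRem_isSome (x v : Int) (bb : List Int) (c : Int) (hc : c ∈ bb) (hf : v + c ≤ x) :
    ∃ bb', pvRemFirst x v bb = some bb' := by
  cases h : pvRemFirst x v bb with
  | some bb' => exact ⟨bb', rfl⟩
  | none => exact absurd hf ((pvRem_none x v bb).mp h c hc)

theorem pvDescEq {B1 B2 : List Int} (hp : B1.Perm B2)
    (h1 : B1.Pairwise (· ≥ ·)) (h2 : B2.Pairwise (· ≥ ·)) : B1 = B2 := by
  exact hp.eq_of_pairwise (fun a b _ _ hab hba => le_antisymm hba hab) h1 h2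

-- exchange lemma: two all-feasible spare elements are interchangeable
theorem pvEx (x : Int) : ∀ (as : List Int), as.Pairwise (· ≥ ·) →
    ∀ (B1 B2 C : List Int) (u v : Int), B1.Pairwise (· ≥ ·) → B2.Pairwise (· ≥ ·) →
    B1.Perm (u :: C) → B2.Perm (v :: C) →
    (∀ t ∈ as, t + u ≤ x ∧ t + v ≤ x) →
    pvGreedy x as B1 = pvGreedy x as B2 := by
  intro as
  induction as with
  | nil => intros; rfl
  | cons t ts ih =>
    intro hts B1 B2 C u v h1 h2 hp1 hp2 hfeas
    have hts' : ts.Pairwise (· ≥ ·) := hts.of_cons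
    have htts : ∀ s ∈ ts, s ≤ t := fun s hs => List.rel_of_pairwise_cons hts hs
    have hu1 : u ∈ B1 := hp1.symm.subset (by simp)
    have hv2 : v ∈ B2 := hp2.symm.subset (by simp)
    have hfu : t + u ≤ x := (hfeas t (by simp)).1
    have hfv : t + v ≤ x := (hfeas t (by simp)).2
    obtain ⟨B1', e1⟩ := pvRem_isSome x t B1 u hu1 hfu
    obtain ⟨B2', e2⟩ := pvRem_isSome x t B2 v hv2 hfv
    obtain ⟨w1, hw1B, hw1f, hw1max, rfl⟩ := pvRem_some x t B1 B1' h1 e1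
    obtain ⟨w2, hw2B, hw2f, hw2max, rfl⟩ := pvRem_some x t B2 B2' h2 e2
    have h1' : (B1.erase w1).Pairwise (· ≥ ·) := List.Pairwise.sublist (List.erase_sublist ..) h1
    have h2' : (B2.erase w2).Pairwise (· ≥ ·) := List.Pairwise.sublist (List.erase_sublist ..) h2
    have g1 : pvGreedy x (t :: ts) B1 = pvGreedy x ts (B1.erase w1) := by simp [pvGreedy, e1]
    have g2 : pvGreedy x (t :: ts) B2 = pvGreedy x ts (B2.erase w2) := by simp [pvGreedy, e2]
    rw [g1, g2]
    have p1' : (B1.erase w1).Perm ((u :: C).erase w1) := hp1.erase w1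
    have p2' : (B2.erase w2).Perm ((v :: C).erase w2) := hp2.erase w2
    by_cases hw1u : w1 = u
    · by_cases hw2v : w2 = v
      · have q1 : (B1.erase w1).Perm C := by
          have h := p1'; rwa [show (u :: C).erase w1 = C from by rw [hw1u]; exact List.erase_cons_head ..] at h
        have q2 : (B2.erase w2).Perm C := by
          have h := p2'; rwa [show (v :: C).erase w2 = C from by rw [hw2v]; exact List.erase_cons_head ..] at h
        rw [pvDescEq (q1.trans q2.symm) h1' h2']
      · have hw2C : w2 ∈ C := by
          have : w2 ∈ v :: C := hp2.subset hw2B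
          rcases List.mem_cons.mp this with h | h
          · exact absurd h hw2v
          · exact h
        have q1 : (B1.erase w1).Perm (w2 :: C.erase w2) := by
          have h := p1'; rw [show (u :: C).erase w1 = C from by rw [hw1u]; exact List.erase_cons_head ..] at h
          exact h.trans (List.perm_cons_erase hw2C)
        have q2 : (B2.erase w2).Perm (v :: C.erase w2) := by
          have h := p2'; rwa [show (v :: C).erase w2 = v :: C.erase w2 from by simp [Ne.symm hw2v]] at h
        refine ih hts' (B1.erase w1) (B2.erase w2) (C.erase w2) w2 v h1' h2' q1 q2 ?_
        intro s hs
        have h1 := htts s hs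
        have h2 := (hfeas s (List.mem_cons_of_mem t hs)).2
        constructor <;> omega
    · by_cases hw2v : w2 = v
      · have hw1C : w1 ∈ C := by
          have : w1 ∈ u :: C := hp1.subset hw1B
          rcases List.mem_cons.mp this with h | h
          · exact absurd h hw1u
          · exact h
        have q1 : (B1.erase w1).Perm (u :: C.erase w1) := by
          have h := p1'; rwa [show (u :: C).erase w1 = u :: C.erase w1 from by simp [Ne.symm hw1u]] at h
        have q2 : (B2.erase w2).Perm (w1 :: C.erase w1) := by
          have h := p2'; rw [show (v :: C).erase w2 = C from by rw [hw2v]; exact List.erase_cons_head ..] at h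
          exact h.trans (List.perm_cons_erase hw1C)
        refine ih hts' (B1.erase w1) (B2.erase w2) (C.erase w1) u w1 h1' h2' q1 q2 ?_
        intro s hs
        have h1 := htts s hs
        have h2 := (hfeas s (List.mem_cons_of_mem t hs)).1
        constructor <;> omega
      · have hw1C : w1 ∈ C := by
          have : w1 ∈ u :: C := hp1.subset hw1B
          rcases List.mem_cons.mp this with h | h
          · exact absurd h hw1u
          · exact h
        have hw2C : w2 ∈ C := by
          have : w2 ∈ v :: C := hp2.subset hw2B
          rcases List.mem_cons.mp this with h | h
          · exact absurd h hw2v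
          · exact h
        have hweq : w1 = w2 := by
          have h12 : w1 ≤ w2 := hw2max w1 (hp2.symm.subset (List.mem_cons_of_mem v hw1C)) hw1f
          have h21 : w2 ≤ w1 := hw1max w2 (hp1.symm.subset (List.mem_cons_of_mem u hw2C)) hw2f
          omega
        have q1 : (B1.erase w1).Perm (u :: C.erase w1) := by
          have h := p1'; rwa [show (u :: C).erase w1 = u :: C.erase w1 from by simp [Ne.symm hw1u]] at h
        have q2 : (B2.erase w2).Perm (v :: C.erase w1) := by
          have h := p2'
          rwa [show (v :: C).erase w2 = v :: C.erase w1 from by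
            rw [← hweq]; simp [Ne.symm (hweq ▸ hw2v : ¬ w1 = v)]] at h
        refine ih hts' (B1.erase w1) (B2.erase w2) (C.erase w1) u v h1' h2' q1 q2 ?_
        intro s hs
        exact hfeas s (List.mem_cons_of_mem t hs)

theorem pvStep2 (x p q : Int) (hpq : q ≤ p) : ∀ (B : List Int), B.Pairwise (· ≥ ·) →
    ((pvRemFirst x p B).bind (pvRemFirst x q)) = ((pvRemFirst x q B).bind (pvRemFirst x p)) := by
  intro B hB
  have mono : ∀ c : Int, p + c ≤ x → q + c ≤ x := fun c h => by omega
  cases hp1 : pvRemFirst x p B with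
  | none =>
    have hnone := (pvRem_none x p B).mp hp1
    cases hq1 : pvRemFirst x q B with
    | none => simp
    | some B2 =>
      obtain ⟨w2, hw2B, hw2f, hw2max, rfl⟩ := pvRem_some x q B B2 hB hq1
      simp only [Option.bind]
      symm
      exact (pvRem_none x p _).mpr (fun c hc => hnone c (List.mem_of_mem_erase hc))
  | some B1 =>
    obtain ⟨w1, hw1B, hw1f, hw1max, rfl⟩ := pvRem_some x p B B1 hB hp1
    have hw1fq : q + w1 ≤ x := mono _ hw1f
    obtain ⟨B2, hq1⟩ := pvRem_isSome x q B w1 hw1B hw1fq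
    obtain ⟨w2, hw2B, hw2f, hw2max, rfl⟩ := pvRem_some x q B B2 hB hq1
    have hBe1 : (B.erase w1).Pairwise (· ≥ ·) := List.Pairwise.sublist (List.erase_sublist ..) hB
    have hBe2 : (B.erase w2).Pairwise (· ≥ ·) := List.Pairwise.sublist (List.erase_sublist ..) hB
    have hw12 : w1 ≤ w2 := hw2max w1 hw1B hw1fq
    rw [hq1]
    simp only [Option.bind]
    by_cases hww : w1 = w2
    · subst hww
      have key : ∀ c ∈ B.erase w1, (q + c ≤ x ↔ p + c ≤ x) := by
        intro c hc
        constructor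
        · intro hqc
          have hcw : c ≤ w1 := hw2max c (List.mem_of_mem_erase hc) hqc
          omega
        · exact mono c
      cases hpe : pvRemFirst x p (B.erase w1) with
      | none =>
        have hn := (pvRem_none x p _).mp hpe
        exact (pvRem_none x q _).mpr (fun c hc hqc => hn c hc ((key c hc).mp hqc))
      | some B' =>
        obtain ⟨w', h'B, h'f, h'max, rfl⟩ := pvRem_some x p _ B' hBe1 hpe
        obtain ⟨B'', hqe⟩ := pvRem_isSome x q _ w' h'B (mono _ h'f)
        obtain ⟨w'', h''B, h''f, h''max, rfl⟩ := pvRem_some x q _ B'' hBe1 hqe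
        have e1 : w'' ≤ w' := h'max w'' h''B ((key _ h''B).mp h''f)
        have e2 : w' ≤ w'' := h''max w' h'B (mono _ h'f)
        have : w' = w'' := by omega
        rw [hqe, this]
    · have hw2e : w2 ∈ B.erase w1 := (List.mem_erase_of_ne (fun h => hww h.symm)).mpr hw2B
      have hw1e : w1 ∈ B.erase w2 := (List.mem_erase_of_ne hww).mpr hw1B
      obtain ⟨Bq, hq2⟩ := pvRem_isSome x q (B.erase w1) w2 hw2e hw2f
      obtain ⟨v2, hv2B, hv2f, hv2max, rfl⟩ := pvRem_some x q _ Bq hBe1 hq2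
      have hv2 : v2 = w2 := le_antisymm (hw2max v2 (List.mem_of_mem_erase hv2B) hv2f) (hv2max w2 hw2e hw2f)
      obtain ⟨Bp, hp2⟩ := pvRem_isSome x p (B.erase w2) w1 hw1e hw1f
      obtain ⟨v1, hv1B, hv1f, hv1max, rfl⟩ := pvRem_some x p _ Bp hBe2 hp2
      have hv1 : v1 = w1 := le_antisymm (hw1max v1 (List.mem_of_mem_erase hv1B) hv1f) (hv1max w1 hw1e hw1f)
      rw [hq2, hp2, hv1, hv2, List.erase_comm]

theorem pvSwap (x p q : Int) (rest : List Int) (B : List Int) (hB : B.Pairwise (· ≥ ·)) :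
    pvGreedy x (p :: q :: rest) B = pvGreedy x (q :: p :: rest) B := by
  have red : ∀ (p q : Int),
      pvGreedy x (p :: q :: rest) B =
        (match (pvRemFirst x p B).bind (pvRemFirst x q) with
          | none => false
          | some R => pvGreedy x rest R) := by
    intro p q
    cases h1 : pvRemFirst x p B with
    | none => simp [pvGreedy, h1]
    | some B' => cases h2 : pvRemFirst x q B' <;> simp [pvGreedy, h1, h2]
  rw [red p q, red q p]
  rcases le_total q p with h | h
  · rw [pvStep2 x p q h B hB]
  · rw [pvStep2 x q p h B hB]

theorem pvPermInv (x : Int) {l1 l2 : List Int} (h : l1.Perm l2) :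
    ∀ B : List Int, B.Pairwise (· ≥ ·) → pvGreedy x l1 B = pvGreedy x l2 B := by
  induction h with
  | nil => intro B _; rfl
  | cons a h ih =>
    intro B hB
    cases he : pvRemFirst x a B with
    | none => simp [pvGreedy, he]
    | some B' =>
      obtain ⟨w, _, _, _, rfl⟩ := pvRem_some x a B B' hB he
      simp [pvGreedy, he, ih _ (List.Pairwise.sublist (List.erase_sublist ..) hB)]
  | swap p q l => intro B hB; exact pvSwap x q p l B hB
  | trans h1 h2 ih1 ih2 => intro B hB; rw [ih1 B hB, ih2 B hB]

theorem pvMain (x : Int) : ∀ (as B : List Int), as.Pairwise (· ≥ ·) → B.Pairwise (· ≥ ·) →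
    pvGreedy x as B =
      (decide (as.length ≤ B.length) && (as.zip B.reverse).all (fun p => p.1 + p.2 ≤ x)) := by
  intro as
  induction as with
  | nil => intro B _ _; simp [pvGreedy]
  | cons t ts ih =>
    intro B hts hB
    have hts' : ts.Pairwise (· ≥ ·) := hts.of_cons
    have htts : ∀ s ∈ ts, s ≤ t := fun s hs => List.rel_of_pairwise_cons hts hs
    rcases hBe : B with _ | ⟨b0, bs⟩
    · simp [pvGreedy, pvRemFirst]
    rw [← hBe]
    have hne : B ≠ [] := by rw [hBe]; simp
    set m := B.getLast hne with hm
    have hmem : m ∈ B := List.getLast_mem hne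
    have hsplit : B = B.dropLast ++ [m] := (List.dropLast_concat_getLast hne).symm
    have hRrev : B.reverse = m :: B.dropLast.reverse := by
      conv_lhs => rw [hsplit]
      simp
    have hmin : ∀ c ∈ B, m ≤ c := by
      intro c hc
      have hrev : B.reverse.Pairwise (· ≤ ·) := List.pairwise_reverse.mpr hB
      rw [hRrev] at hrev
      have hc' : c ∈ B.reverse := List.mem_reverse.mpr hc
      rw [hRrev] at hc'
      rcases List.mem_cons.mp hc' with h | h
      · omega
      · exact List.rel_of_pairwise_cons hrev h
    have hdl : B.dropLast.Pairwise (· ≥ ·) := List.Pairwise.sublist (List.dropLast_sublist B) hB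
    have hlen : B.length = B.dropLast.length + 1 := by
      conv_lhs => rw [hsplit]
      simp
    by_cases hf : t + m ≤ x
    · obtain ⟨B', he⟩ := pvRem_isSome x t B m hmem hf
      obtain ⟨w, hwB, hwf, hwmax, rfl⟩ := pvRem_some x t B B' hB he
      have hBer : (B.erase w).Pairwise (· ≥ ·) := List.Pairwise.sublist (List.erase_sublist ..) hB
      have hperm_m : B.Perm (m :: B.dropLast) := by
        conv_lhs => rw [hsplit]
        exact List.perm_append_singleton ..
      have hEm : B.erase m = B.dropLast := by
        refine pvDescEq ?_ (List.Pairwise.sublist (List.erase_sublist ..) hB) hdl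
        exact ((List.perm_cons_erase hmem).symm.trans hperm_m).cons_inv
      have hstep : pvGreedy x (t :: ts) B = pvGreedy x ts (B.erase w) := by
        simp [pvGreedy, he]
      have hExch : pvGreedy x ts (B.erase w) = pvGreedy x ts B.dropLast := by
        by_cases hwm : w = m
        · rw [hwm, hEm]
        · have hmE : m ∈ B.erase w := (List.mem_erase_of_ne (fun h => hwm h.symm)).mpr hmem
          have hwE : w ∈ B.erase m := (List.mem_erase_of_ne hwm).mpr hwB
          refine pvEx x ts hts' (B.erase w) B.dropLast ((B.erase w).erase m) m w hBer hdl
            (List.perm_cons_erase hmE) ?_ ?_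
          · rw [← hEm, List.erase_comm]
            exact List.perm_cons_erase hwE
          · intro s hs
            have h1 := htts s hs
            have h2 := hmin w hwB
            constructor <;> omega
      rw [hstep, hExch, ih B.dropLast hts' hdl, hRrev]
      have hlf : decide ((t :: ts).length ≤ B.length) = decide (ts.length ≤ B.dropLast.length) := by
        rw [decide_eq_decide, List.length_cons, hlen]
        omega
      rw [hlf]
      simp only [List.zip_cons_cons, List.all_cons]
      rw [decide_eq_true hf, Bool.true_and]
    · have hnone : pvRemFirst x t B = none :=
        (pvRem_none x t B).mpr (fun c hc => by have := hmin c hc; omega)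
      rw [hRrev]
      simp [pvGreedy, hnone, hf]

-- ===== VERDICT (by name: the statement is the Claim_ definition above) =====
theorem solution_spec : Claim_equal_solution := by
  unfold Claim_equal_solution
  intro n x a b _
  unfold Spec_solution solution solution_alt
  simp only []
  rw [pvLoop_greedy, pvMask_replicate]
  have hAdP : (PySem.List.sorted a (fun y => y) true).Pairwise (· ≥ ·) :=
    PySem.List.sorted_pairwise_rev a (fun y => y)
  have hBdP : (PySem.List.sorted b (fun y => y) true).Pairwise (· ≥ ·) :=
    PySem.List.sorted_pairwise_rev b (fun y => y)
  have hBaP : (PySem.List.sorted b (fun y => y) false).Pairwise (· ≤ ·) :=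
    PySem.List.sorted_pairwise b (fun y => y)
  have hperm : a.Perm (PySem.List.sorted a (fun y => y) true) :=
    (PySem.List.sorted_perm ..).symm
  rw [pvPermInv x hperm _ hBdP,
    pvMain x _ _ hAdP hBdP]
  have hrev : (PySem.List.sorted b (fun y => y) true).reverse
      = PySem.List.sorted b (fun y => y) false := by
    have hpw : (PySem.List.sorted b (fun y => y) true).reverse.Pairwise (· ≤ ·) :=
      List.pairwise_reverse.mpr hBdP
    have hp : (PySem.List.sorted b (fun y => y) true).reverse.Perm
        (PySem.List.sorted b (fun y => y) false) :=
      ((PySem.List.sorted b (fun y => y) true).reverse_perm.trans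
        (PySem.List.sorted_perm b (fun y => y) true)).trans
        (PySem.List.sorted_perm b (fun y => y) false).symm
    exact hp.eq_of_pairwise (fun a b _ _ hab hba => le_antisymm hab hba) hpw hBaP
  rw [hrev]
  have hlen : (PySem.List.sorted b (fun y => y) true).length
      = (PySem.List.sorted b (fun y => y) false).length := by
    rw [PySem.List.length_sorted, PySem.List.length_sorted]
  rw [hlen]
  by_cases hl : a.length ≤ b.length
  · have hle : (PySem.List.sorted a (fun y => y) true).length
        ≤ (PySem.List.sorted b (fun y => y) false).length := by
      rw [PySem.List.length_sorted, PySem.List.length_sorted]; exact hl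
    rw [decide_eq_true hle, Bool.true_and, if_neg (Nat.not_lt.mpr hle)]
  · have hnle : ¬ (PySem.List.sorted a (fun y => y) true).length
        ≤ (PySem.List.sorted b (fun y => y) false).length := by
      rw [PySem.List.length_sorted, PySem.List.length_sorted]; exact hl
    rw [decide_eq_false hnle, Bool.false_and, if_neg (show ¬ (false = true) from by simp),
      if_pos (Nat.not_le.mp hnle)]
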